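-- pv_equiv track=rewrite | github.com/GabrieldePaulaDev/HackatonCetec | ControlePecasDXF.py | dedupe_keep_best
-- ===== SOURCE A (Python) =====
-- def dedupe_keep_best(items):
--     best = {}
--     prio = {"block": 2, "text-nearest": 1, "other": 0}
--     for it in items:
--         key = it["id"]
--         score = prio.get(it.get("source", "other"), 0) + (1 if it.get("section") else 0)
--         if key not in best:
--             best[key] = (score, it)
--         else:
--             if score > best[key][0]:
--                 best[key] = (score, it)
--     return [v[1] for v in best.values()]
-- ===== SOURCE B (Python) =====
-- def dedupe_keep_best(items):
--     prio = {"block": 2, "text-nearest": 1, "other": 0}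
--
--     def score(it):
--         return prio.get(it.get("source", "other"), 0) + (1 if it.get("section") else 0)
--
--     groups = {}
--     for it in items:
--         groups.setdefault(it["id"], []).append(it)
--     return [max(g, key=score) for g in groups.values()]
-- ===== Notes on version B (the rewrite author's own statement) =====
-- stated objective: alternative
-- what changed: A keeps a single running (best-score, item) pair per id in one dict; B first groups all items by id (setdefault/append) and then reduces each group with max(key=score), relying on dict insertion order and max's first-maximum tie-break.
import Mathlib
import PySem

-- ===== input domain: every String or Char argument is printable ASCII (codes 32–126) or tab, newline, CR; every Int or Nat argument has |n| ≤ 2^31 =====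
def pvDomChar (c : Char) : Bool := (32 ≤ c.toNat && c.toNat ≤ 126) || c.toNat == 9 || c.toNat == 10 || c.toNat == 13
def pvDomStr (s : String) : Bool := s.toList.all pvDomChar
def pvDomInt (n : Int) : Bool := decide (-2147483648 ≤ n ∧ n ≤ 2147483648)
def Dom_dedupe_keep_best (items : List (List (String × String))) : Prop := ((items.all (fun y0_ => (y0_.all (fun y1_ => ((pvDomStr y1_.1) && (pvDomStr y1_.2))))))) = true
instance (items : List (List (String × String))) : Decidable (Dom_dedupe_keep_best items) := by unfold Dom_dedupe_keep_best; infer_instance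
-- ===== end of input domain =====

-- B groups items by id first and then takes the first score-maximal item of each group,
-- instead of A's single running-best pass; same return value (alternative decomposition, not faster).


-- ===== PORT A =====
-- score = prio.get(it.get("source", "other"), 0) + (1 if it.get("section") else 0)
-- (identical expression in both Pythons, so shared by both ports)
def pvPrio : PySem.Dict String Int :=
  PySem.Dict.ofList [("block", 2), ("text-nearest", 1), ("other", 0)]

def pvScore (it : List (String × String)) : Int :=
  pvPrio.getD (((PySem.Dict.mk it).get? "source").getD "other") 0 +
    (if ((PySem.Dict.mk it).get? "section").getD "" ≠ "" then 1 else 0)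

-- one iteration of A's loop; none = KeyError on it["id"]
def pvStepA (best : PySem.Dict String (Int × List (String × String)))
    (it : List (String × String)) :
    Option (PySem.Dict String (Int × List (String × String))) :=
  match (PySem.Dict.mk it).get? "id" with
  | none => none
  | some key =>
    let score := pvScore it
    if best.contains key = false then
      some (best.insert key (score, it))
    else if (best.getD key (0, [])).1 < score then  -- score > best[key][0]; key is present here
      some (best.insert key (score, it))
    else
      some best

def dedupe_keep_best (items : List (List (String × String))) : List (List (String × String)) :=
  match items.foldl (fun acc it => acc.bind (fun b => pvStepA b it))
      (some (PySem.Dict.empty : PySem.Dict String (Int × List (String × String)))) with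
  | none => []  -- unreachable under Pre_ (A raises KeyError)
  | some best => best.values.map (·.2)

-- ===== PORT B =====
def dedupe_keep_best_alt (items : List (List (String × String))) : List (List (String × String)) :=
  match items.foldl
      (fun acc it => acc.bind (fun g =>
        ((PySem.Dict.mk it).get? "id").map (fun key => g.modify key [] (· ++ [it]))))
      (some (PySem.Dict.empty : PySem.Dict String (List (List (String × String))))) with
  | none => []  -- unreachable under Pre_ (B raises KeyError too)
  | some groups => groups.values.map (fun g => (PySem.List.max? g pvScore).getD [])

-- ===== PRECONDITION & SPEC =====
-- Pre_ excludes exactly the inputs where some item lacks an "id" key: there A raises KeyError.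
def Pre_dedupe_keep_best (items : List (List (String × String))) : Prop :=
  ∀ it ∈ items, (PySem.Dict.mk it).contains "id" = true
instance (items : List (List (String × String))) : Decidable (Pre_dedupe_keep_best items) := by
  unfold Pre_dedupe_keep_best; infer_instance

def pvWitness_dedupe_keep_best : (List (List (String × String))) :=
  [[("id", "a"), ("source", "block")], [("id", "a"), ("section", "s")], [("id", "b")]]

def Spec_dedupe_keep_best (items : List (List (String × String))) (out : List (List (String × String))) : Prop := out = dedupe_keep_best_alt items
instance (items : List (List (String × String))) (out : List (List (String × String))) : Decidable (Spec_dedupe_keep_best items out) := by unfold Spec_dedupe_keep_best; infer_instance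

-- ===== CLAIM (what is proved, stated in full; the proofs are below) =====
def Claim_equal_dedupe_keep_best : Prop := ∀ (items : List (List (String × String))), Dom_dedupe_keep_best items → Pre_dedupe_keep_best items → Spec_dedupe_keep_best items (dedupe_keep_best items)

-- ===== LEMMAS AND PROOFS =====

-- max over a group grown by one element is A's running-best update
theorem pv_max?_append (g : List (List (String × String))) (x m : List (String × String))
    (h : PySem.List.max? g pvScore = some m) :
    PySem.List.max? (g ++ [x]) pvScore =
      if pvScore m < pvScore x then some x else some m := by
  simp only [PySem.List.max?] at h ⊢
  rw [List.foldl_append, h, List.foldl_cons, List.foldl_nil]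

-- the loop invariant: A's best dict and B's groups dict stay in lockstep
theorem pv_loop (l : List (List (String × String)))
    (best : PySem.Dict String (Int × List (String × String)))
    (groups : PySem.Dict String (List (List (String × String))))
    (hpre : ∀ it ∈ l, (PySem.Dict.mk it).contains "id" = true)
    (hkeys : best.keys = groups.keys) (hnd : best.keys.Nodup)
    (hval : ∀ k s m, best.get? k = some (s, m) →
      ∃ g, groups.get? k = some g ∧ PySem.List.max? g pvScore = some m ∧ s = pvScore m) :
    ∃ best' groups',
      l.foldl (fun acc it => acc.bind (fun b => pvStepA b it)) (some best) = some best' ∧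
      l.foldl (fun acc it => acc.bind (fun g =>
          ((PySem.Dict.mk it).get? "id").map (fun key => g.modify key [] (· ++ [it]))))
        (some groups) = some groups' ∧
      best'.keys = groups'.keys ∧ best'.keys.Nodup ∧
      ∀ k s m, best'.get? k = some (s, m) →
        ∃ g, groups'.get? k = some g ∧ PySem.List.max? g pvScore = some m ∧ s = pvScore m := by
  induction l generalizing best groups with
  | nil => exact ⟨best, groups, rfl, rfl, hkeys, hnd, hval⟩
  | cons it t ih =>
    have hid : (PySem.Dict.mk it).contains "id" = true := hpre it (List.mem_cons_self ..)
    rw [PySem.Dict.contains_eq_isSome_get?] at hid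
    obtain ⟨key, hkey⟩ := Option.isSome_iff_exists.mp hid
    have hpret : ∀ x ∈ t, (PySem.Dict.mk x).contains "id" = true :=
      fun x hx => hpre x (List.mem_cons_of_mem _ hx)
    simp only [List.foldl_cons, Option.bind_some, pvStepA, hkey, Option.map_some]
    by_cases hc : best.contains key = true
    · -- key already seen
      have hbs : (best.get? key).isSome := by rw [← PySem.Dict.contains_eq_isSome_get?]; exact hc
      obtain ⟨p, hp⟩ := Option.isSome_iff_exists.mp hbs
      obtain ⟨g, hg, hm, hs⟩ := hval key p.1 p.2 (by rw [hp])
      have hgc : groups.contains key = true := by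
        rw [PySem.Dict.contains_eq_isSome_get?, hg]; rfl
      have hbd : best.getD key (0, []) = p := PySem.Dict.getD_of_get?_eq_some _ _ hp
      have hmod : groups.modify key [] (· ++ [it]) = groups.insert key (g ++ [it]) := by
        simp [PySem.Dict.modify, PySem.Dict.getD_of_get?_eq_some _ _ hg]
      rw [hmod, hc, hbd]
      simp only [Bool.true_eq_false, if_false]
      have hkeys' : best.keys = (groups.insert key (g ++ [it])).keys := by
        rw [PySem.Dict.keys_insert_of_contains _ _ hgc]; exact hkeys
      have hmax := pv_max?_append g it p.2 hm
      by_cases hlt : p.1 < pvScore it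
      · rw [if_pos hlt]
        apply ih (best.insert key (pvScore it, it)) (groups.insert key (g ++ [it])) hpret
        · rw [PySem.Dict.keys_insert_of_contains _ _ hc]; exact hkeys'
        · rw [PySem.Dict.keys_insert_of_contains _ _ hc]; exact hnd
        · intro k s m h
          rw [PySem.Dict.get?_insert] at h
          by_cases hk : k = key
          · subst hk
            rw [if_pos rfl] at h
            refine ⟨g ++ [it], PySem.Dict.get?_insert_self .., ?_, ?_⟩
            · rw [hmax, if_pos (by rw [← hs]; exact hlt)]
              injection h with h'; injection h' with _ h2; rw [h2]
            · injection h with h'; injection h' with h1 h2; rw [← h1, ← h2]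
          · rw [if_neg hk] at h
            obtain ⟨g', hg', hm', hs'⟩ := hval k s m h
            exact ⟨g', by rw [PySem.Dict.get?_insert_of_ne _ _ hk]; exact hg', hm', hs'⟩
      · rw [if_neg hlt]
        apply ih best (groups.insert key (g ++ [it])) hpret (hkeys') hnd
        intro k s m h
        by_cases hk : k = key
        · subst hk
          rw [hp] at h; injection h with h'
          refine ⟨g ++ [it], PySem.Dict.get?_insert_self .., ?_, ?_⟩
          · have hm2 : p.2 = m := by rw [h']
            rw [hmax, if_neg (hs ▸ hlt), hm2]
          · rw [h'] at hs; simpa using hs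
        · obtain ⟨g', hg', hm', hs'⟩ := hval k s m h
          exact ⟨g', by rw [PySem.Dict.get?_insert_of_ne _ _ hk]; exact hg', hm', hs'⟩
    · -- fresh key
      have hcf : best.contains key = false := by
        cases h : best.contains key
        · rfl
        · exact absurd h hc
      have hmemb : key ∉ best.keys := fun hmem =>
        hc ((PySem.Dict.contains_iff_mem_keys ..).mpr hmem)
      have hgc : groups.contains key = false := by
        cases h : groups.contains key
        · rfl
        · exact absurd (by rw [hkeys]; exact (PySem.Dict.contains_iff_mem_keys ..).mp h) hmemb
      have hmod : groups.modify key [] (· ++ [it]) = groups.insert key [it] := by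
        simp [PySem.Dict.modify, PySem.Dict.getD_of_not_contains _ _ hgc]
      rw [hmod, hcf]
      apply ih (best.insert key (pvScore it, it)) (groups.insert key [it]) hpret
      · rw [PySem.Dict.keys_insert_of_not_contains _ _ hcf,
          PySem.Dict.keys_insert_of_not_contains _ _ hgc, hkeys]
      · exact PySem.Dict.nodup_keys_insert _ _ _ hnd
      · intro k s m h
        rw [PySem.Dict.get?_insert] at h
        by_cases hk : k = key
        · subst hk
          rw [if_pos rfl] at h
          injection h with h'; injection h' with h1 h2
          refine ⟨[it], PySem.Dict.get?_insert_self .., ?_, ?_⟩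
          · rw [← h2]; rfl
          · rw [← h1, ← h2]
        · rw [if_neg hk] at h
          obtain ⟨g', hg', hm', hs'⟩ := hval k s m h
          exact ⟨g', by rw [PySem.Dict.get?_insert_of_ne _ _ hk]; exact hg', hm', hs'⟩

-- ===== VERDICT (by name: the statement is the Claim_ definition above) =====
theorem dedupe_keep_best_spec : Claim_equal_dedupe_keep_best := by
  intro items _hdom hpre
  unfold Spec_dedupe_keep_best
  obtain ⟨best', groups', hA, hB, hk', hnd', hval'⟩ :=
    pv_loop items PySem.Dict.empty PySem.Dict.empty hpre rfl List.nodup_nil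
      (fun k s m h => by rw [PySem.Dict.get?_empty] at h; cases h)
  unfold dedupe_keep_best dedupe_keep_best_alt
  simp only [hA, hB]
  rw [PySem.Dict.values_eq_map_keys best' hnd' (0, []),
    PySem.Dict.values_eq_map_keys groups' (by rw [← hk']; exact hnd') [],
    List.map_map, ← hk', List.map_map]
  apply List.map_congr_left
  intro k hkmem
  have hbs : (best'.get? k).isSome := by
    rw [← PySem.Dict.contains_eq_isSome_get?]
    exact (PySem.Dict.contains_iff_mem_keys ..).mpr hkmem
  obtain ⟨p, hp⟩ := Option.isSome_iff_exists.mp hbs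
  obtain ⟨g, hg, hm, _⟩ := hval' k p.1 p.2 (by rw [hp])
  simp only [Function.comp_apply]
  rw [PySem.Dict.getD_of_get?_eq_some _ _ hp, PySem.Dict.getD_of_get?_eq_some _ _ hg, hm]
  rfl
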